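-- pv_equiv track=rewrite | github.com/Walentalien/AGH-ASD-2023-2024 | SORTING/Offlines1-3/offline2/zad2.py | sum_of_k_biggest_in_subarrays
-- ===== SOURCE A (Python) =====
-- import bisect
--
-- def sum_of_k_biggest_in_subarrays(T, p, k):
--     n = len(T)
--     result = 0
--
--     # Initialize the first window and sort it
--     window = sorted(T[:p])
--
--     # Add the k-th largest element from the first window to the result
--     result += window[-k]
--
--     for i in range(p, n):
--         # Remove the element that is sliding out of the window
--         outgoing_element = T[i - p]
--         incoming_element = T[i]
--
--         # Find and remove the outgoing element from the sorted window
--         idx = bisect.bisect_left(window, outgoing_element)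
--         window.pop(idx)
--
--         # Insert the incoming element to the sorted window
--         bisect.insort(window, incoming_element)
--
--         # Add the k-th largest element from the current window to the result
--         result += window[-k]
--
--     return result
-- ===== SOURCE B (Python) =====
-- def sum_of_k_biggest_in_subarrays(T, p, k):
--     # Stateless re-implementation: the first window T[:p] (clamped by slicing, like A's),
--     # then each later window sorted from scratch -- no incremental window maintenance.
--     total = sorted(T[:p])[-k]
--     for i in range(1, len(T) - p + 1):
--         total += sorted(T[i:i + p])[-k]
--     return total
-- ===== Notes on version B (the rewrite author's own statement) =====
-- stated objective: simpler
-- what changed: B replaces A's incrementally maintained sorted window (bisect delete/insert carried across iterations) by a stateless loop that sorts each window slice from scratch and adds its k-th largest.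
import Mathlib
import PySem

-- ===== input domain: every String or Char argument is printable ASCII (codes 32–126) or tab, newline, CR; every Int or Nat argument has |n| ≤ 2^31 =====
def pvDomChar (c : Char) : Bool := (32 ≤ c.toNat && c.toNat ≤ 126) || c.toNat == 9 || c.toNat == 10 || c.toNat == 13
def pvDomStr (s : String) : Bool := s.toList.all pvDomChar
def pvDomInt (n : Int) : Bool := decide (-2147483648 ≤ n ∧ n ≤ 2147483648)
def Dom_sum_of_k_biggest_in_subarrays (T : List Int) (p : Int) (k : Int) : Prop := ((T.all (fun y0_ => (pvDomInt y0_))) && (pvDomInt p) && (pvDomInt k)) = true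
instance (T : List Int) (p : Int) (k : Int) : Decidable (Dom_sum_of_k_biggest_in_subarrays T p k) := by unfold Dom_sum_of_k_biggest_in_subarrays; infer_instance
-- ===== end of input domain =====

-- B: stateless per-window sort-and-pick summation instead of A's incrementally
-- maintained sorted window (simpler; same windows, each sorted from scratch).


-- ===== PORT A =====
-- the body of A's `for i in range(p, n)` loop, on state (result, window):
-- bisect.bisect_left is PySem.List.bisectLeft, window.pop(idx) is PySem.List.pop?,
-- bisect.insort is insert at PySem.List.bisectRight (insort = insort_right);
-- T[i-p], T[i], window[-k] are pyGetD (in range under Pre_).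
def pvStepA (T : List Int) (p k : Int) (st : Int × List Int) (i : Int) : Int × List Int :=
  let outgoing : Int := PySem.List.pyGetD T (i - p) 0
  let incoming : Int := PySem.List.pyGetD T i 0
  let idx : Nat := PySem.List.bisectLeft st.2 outgoing
  let window : List Int := ((PySem.List.pop? st.2 (idx : Int)).map Prod.snd).getD st.2
  let window : List Int := PySem.List.insert window ((PySem.List.bisectRight window incoming : Nat) : Int) incoming
  (st.1 + PySem.List.pyGetD window (-k) 0, window)

-- literal transliteration of A: sorted first window T[:p], add window[-k], then fold the
-- loop body pvStepA over range(p, n) carrying (result, window); return the result.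
def sum_of_k_biggest_in_subarrays (T : List Int) (p : Int) (k : Int) : Int :=
  let n : Int := PySem.List.len T
  let result : Int := 0
  let window : List Int := PySem.List.sorted (PySem.List.slice T none (some p)) (fun x => x) false
  let result : Int := result + PySem.List.pyGetD window (-k) 0
  ((PySem.List.pyRange p n 1).foldl (pvStepA T p k) (result, window)).1

-- ===== PORT B =====
-- literal transliteration of B: total = sorted(T[:p])[-k], then
-- for i in range(1, len(T)-p+1): total += sorted(T[i:i+p])[-k]
def sum_of_k_biggest_in_subarrays_alt (T : List Int) (p : Int) (k : Int) : Int :=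
  let total : Int := PySem.List.pyGetD
    (PySem.List.sorted (PySem.List.slice T none (some p)) (fun x => x) false) (-k) 0
  (PySem.List.pyRange 1 (PySem.List.len T - p + 1) 1).foldl
    (fun total i =>
      total + PySem.List.pyGetD
        (PySem.List.sorted (PySem.List.slice T (some i) (some (i + p))) (fun x => x) false)
        (-k) 0)
    total

-- ===== PRECONDITION & SPEC =====
-- Pre_: exactly the inputs where Python A returns normally: p ≥ 1, T nonempty, and k a
-- valid negative index into the first window of length min(p, len T) (Python slicing
-- clamps T[:p], so for p > len T the single window is all of T); A raises IndexError
-- on every other input.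
def Pre_sum_of_k_biggest_in_subarrays (T : List Int) (p : Int) (k : Int) : Prop :=
  1 ≤ p ∧ T ≠ [] ∧ -(min p (T.length : Int)) < k ∧ k ≤ min p (T.length : Int)
instance (T : List Int) (p : Int) (k : Int) : Decidable (Pre_sum_of_k_biggest_in_subarrays T p k) := by unfold Pre_sum_of_k_biggest_in_subarrays; infer_instance

def pvWitness_sum_of_k_biggest_in_subarrays : List Int × Int × Int := ([3, 1, 4, 1, 5], 3, 2)

def Spec_sum_of_k_biggest_in_subarrays (T : List Int) (p : Int) (k : Int) (out : Int) : Prop := out = sum_of_k_biggest_in_subarrays_alt T p k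
instance (T : List Int) (p : Int) (k : Int) (out : Int) : Decidable (Spec_sum_of_k_biggest_in_subarrays T p k out) := by unfold Spec_sum_of_k_biggest_in_subarrays; infer_instance

-- ===== CLAIM (what is proved, stated in full; the proofs are below) =====
def Claim_equal_sum_of_k_biggest_in_subarrays : Prop := ∀ (T : List Int) (p : Int) (k : Int), Dom_sum_of_k_biggest_in_subarrays T p k → Pre_sum_of_k_biggest_in_subarrays T p k → Spec_sum_of_k_biggest_in_subarrays T p k (sum_of_k_biggest_in_subarrays T p k)

-- ===== LEMMAS AND PROOFS =====

theorem sum_of_k_biggest_in_subarrays_witness_ok :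
    Dom_sum_of_k_biggest_in_subarrays (pvWitness_sum_of_k_biggest_in_subarrays.1) (pvWitness_sum_of_k_biggest_in_subarrays.2.1) (pvWitness_sum_of_k_biggest_in_subarrays.2.2) ∧
    Pre_sum_of_k_biggest_in_subarrays (pvWitness_sum_of_k_biggest_in_subarrays.1) (pvWitness_sum_of_k_biggest_in_subarrays.2.1) (pvWitness_sum_of_k_biggest_in_subarrays.2.2) := by
  decide

-- sorted window over T[j : j+P] (as a dropped/taken slice), and the per-window summand
def pvWin (T : List Int) (P j : Nat) : List Int :=
  PySem.List.sorted ((T.drop j).take P) (fun x => x) false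

def pvF (T : List Int) (P j : Nat) (k : Int) : Int :=
  PySem.List.pyGetD (pvWin T P j) (-k) 0

-- popping at bisect_left of a member of a sorted list is eraseIdx there, and undoes a cons (up to Perm)
theorem pv_pop_bisectLeft (w : List Int) (x : Int)
    (hpw : w.Pairwise (· ≤ ·)) (hmem : x ∈ w) :
    ((PySem.List.pop? w ((PySem.List.bisectLeft w x : Nat) : Int)).map Prod.snd).getD w
      = w.eraseIdx (PySem.List.bisectLeft w x)
    ∧ (x :: w.eraseIdx (PySem.List.bisectLeft w x)).Perm w := by
  obtain ⟨hle, hlt, hge⟩ := PySem.List.bisectLeft_spec w x hpw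
  obtain ⟨jx, hjx, hx⟩ := List.mem_iff_getElem.mp hmem
  have hbljx : PySem.List.bisectLeft w x ≤ jx := by
    by_contra h
    exact absurd (hlt jx hjx (by omega)) (by simp [hx])
  have hbl : PySem.List.bisectLeft w x < w.length := lt_of_le_of_lt hbljx hjx
  have hwbl : w[PySem.List.bisectLeft w x] = x := by
    rcases Nat.lt_or_ge (PySem.List.bisectLeft w x) jx with h | h
    · have h1 : w[PySem.List.bisectLeft w x] ≤ w[jx] :=
        List.pairwise_iff_getElem.mp hpw _ _ hbl hjx h
      have h2 := hge _ hbl le_rfl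
      rw [hx] at h1
      omega
    · have : jx = PySem.List.bisectLeft w x := le_antisymm h hbljx
      simp [← this, hx]
  constructor
  · rw [PySem.List.pop?_natCast w _ hbl]
    rfl
  · have hw : w.take (PySem.List.bisectLeft w x) ++ x :: w.drop (PySem.List.bisectLeft w x + 1) = w := by
      conv_rhs => rw [← List.take_append_drop (PySem.List.bisectLeft w x) w,
        List.drop_eq_getElem_cons hbl, hwbl]
    rw [List.eraseIdx_eq_take_drop_succ]
    exact (hw ▸ (List.perm_middle (a := x)
      (l₁ := w.take (PySem.List.bisectLeft w x))
      (l₂ := w.drop (PySem.List.bisectLeft w x + 1)))).symm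

-- insort (insert at bisect_right) keeps the list sorted and is a cons up to Perm
theorem pv_insort (w : List Int) (y : Int) (hpw : w.Pairwise (· ≤ ·)) :
    (PySem.List.insert w ((PySem.List.bisectRight w y : Nat) : Int) y).Pairwise (· ≤ ·)
    ∧ (PySem.List.insert w ((PySem.List.bisectRight w y : Nat) : Int) y).Perm (y :: w) := by
  obtain ⟨hle, hlt, hgt⟩ := PySem.List.bisectRight_spec w y hpw
  rw [PySem.List.insert_natCast w _ y hle]
  have hdrop : ∀ b ∈ w.drop (PySem.List.bisectRight w y), y < b := by
    intro b hb
    obtain ⟨jd, hjd, hbj⟩ := List.mem_iff_getElem.mp hb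
    simp only [List.length_drop] at hjd
    have hbd : PySem.List.bisectRight w y + jd < w.length := by omega
    have hbw : b = w[PySem.List.bisectRight w y + jd] := by
      rw [← hbj, List.getElem_drop]
    exact hbw ▸ hgt _ hbd (by omega)
  have htake : ∀ a ∈ w.take (PySem.List.bisectRight w y), a ≤ y := by
    intro a ha
    obtain ⟨ja, hja, haj⟩ := List.mem_iff_getElem.mp ha
    simp only [List.length_take, lt_min_iff] at hja
    have haw : a = w[ja]'hja.2 := by rw [← haj, List.getElem_take]
    exact haw ▸ hlt _ hja.2 hja.1
  constructor
  · rw [List.pairwise_append]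
    refine ⟨hpw.sublist (List.take_sublist _ _), ?_, ?_⟩
    · rw [List.pairwise_cons]
      exact ⟨fun b hb => le_of_lt (hdrop b hb), hpw.sublist (List.drop_sublist _ _)⟩
    · intro a ha b hb
      rcases List.mem_cons.mp hb with rfl | hb
      · exact htake a ha
      · exact le_trans (htake a ha) (le_of_lt (hdrop b hb))
  · have h1 : (w.take (PySem.List.bisectRight w y) ++ y :: w.drop (PySem.List.bisectRight w y)).Perm
        (y :: (w.take (PySem.List.bisectRight w y) ++ w.drop (PySem.List.bisectRight w y))) :=
      List.perm_middle
    rw [List.take_append_drop] at h1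
    exact h1

-- the heart: one iteration of A's loop body turns the sorted window over T[j:j+P]
-- into the sorted window over T[j+1:j+1+P] and adds that window's summand
theorem pvStepA_eq (T : List Int) (P : Nat) (k : Int) (hP : 1 ≤ P)
    (j : Nat) (hj : j + P < T.length) (res : Int) :
    pvStepA T (P : Int) k (res, pvWin T P j) ((P : Int) + (j : Int))
      = (res + pvF T P (j + 1) k, pvWin T P (j + 1)) := by
  have hjlen : j < T.length := by omega
  have hpw : (pvWin T P j).Pairwise (· ≤ ·) :=
    PySem.List.sorted_pairwise ((T.drop j).take P) (fun x => x)
  -- the slice and its decompositions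
  obtain ⟨q, rfl⟩ : ∃ q, P = q + 1 := ⟨P - 1, by omega⟩
  have hs : (T.drop j).take (q + 1) = T[j] :: (T.drop (j + 1)).take q := by
    rw [List.drop_eq_getElem_cons hjlen, List.take_succ_cons]
  have h1 : q < (T.drop (j + 1)).length := by simp only [List.length_drop]; omega
  have hs' : (T.drop (j + 1)).take (q + 1) = (T.drop (j + 1)).take q ++ [T[j + 1 + q]] := by
    rw [List.take_add_one, List.getElem?_eq_getElem h1, List.getElem_drop]
    simp
  have hmem : T[j] ∈ pvWin T (q + 1) j := by
    rw [pvWin, PySem.List.mem_sorted, hs]; exact List.mem_cons_self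
  obtain ⟨hpop, hperm⟩ := pv_pop_bisectLeft (pvWin T (q + 1) j) T[j] hpw hmem
  -- indices into T
  have hout : PySem.List.pyGetD T (((q + 1 : Nat) : Int) + (j : Int) - ((q + 1 : Nat) : Int)) 0 = T[j] := by
    rw [show ((q + 1 : Nat) : Int) + (j : Int) - ((q + 1 : Nat) : Int) = ((j : Nat) : Int) by ring]
    rw [PySem.List.pyGetD_natCast, List.getD_eq_getElem T 0 hjlen]
  have hin : PySem.List.pyGetD T (((q + 1 : Nat) : Int) + (j : Int)) 0 = T[j + 1 + q] := by
    rw [show ((q + 1 : Nat) : Int) + (j : Int) = ((j + 1 + q : Nat) : Int) by omega]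
    rw [PySem.List.pyGetD_natCast, List.getD_eq_getElem T 0 (by omega)]
  -- unfold the step
  simp only [pvStepA]
  simp only [hout, hin, hpop]
  -- the popped window
  set w' := (pvWin T (q + 1) j).eraseIdx (PySem.List.bisectLeft (pvWin T (q + 1) j) T[j]) with hw'
  have hpw' : w'.Pairwise (· ≤ ·) := hpw.sublist (List.eraseIdx_sublist _ _)
  obtain ⟨hins_pw, hins_perm⟩ := pv_insort w' T[j + 1 + q] hpw'
  -- the new window is sorted and a permutation of the new slice
  have hperm_slice : (pvWin T (q + 1) j).Perm ((T.drop j).take (q + 1)) := PySem.List.sorted_perm _ _ _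
  have hw'_perm : w'.Perm ((T.drop (j + 1)).take (q)) := by
    have := hperm.trans (hperm_slice.trans (by rw [hs]))
    exact this.cons_inv
  have hnew_perm : (PySem.List.insert w' ((PySem.List.bisectRight w' T[j + 1 + q] : Nat) : Int) T[j + 1 + q]).Perm
      ((T.drop (j + 1)).take (q + 1)) := by
    refine hins_perm.trans ?_
    rw [hs']
    exact (hw'_perm.cons T[j + 1 + q]).trans (List.perm_append_singleton _ _).symm
  have hwin : PySem.List.insert w' ((PySem.List.bisectRight w' T[j + 1 + q] : Nat) : Int) T[j + 1 + q]
      = pvWin T (q + 1) (j + 1) :=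
    (PySem.List.sorted_id_eq_of_perm_of_pairwise _ _ hnew_perm hins_pw).symm
  rw [hwin]
  rfl

-- A's loop, started at i = p + j on the window over T[j:j+P], accumulates the remaining summands
theorem pvLoop (T : List Int) (P : Nat) (k : Int) (hP : 1 ≤ P) :
    ∀ (m j : Nat) (res : Int), j + P + m = T.length →
      ((PySem.List.pyRange ((P : Int) + (j : Int)) ((T.length : Nat) : Int) 1).foldl
          (pvStepA T (P : Int) k) (res, pvWin T P j)).1
        = res + ((List.range m).map (fun t => pvF T P (j + 1 + t) k)).sum := by
  intro m
  induction m with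
  | zero =>
    intro j res hlen
    rw [PySem.List.pyRange_one_eq_nil (by omega)]
    simp
  | succ m ih =>
    intro j res hlen
    rw [PySem.List.pyRange_one_cons (by omega), List.foldl_cons,
      pvStepA_eq T P k hP j (by omega) res]
    rw [show (P : Int) + (j : Int) + 1 = (P : Int) + ((j + 1 : Nat) : Int) by omega]
    rw [ih (j + 1) _ (by omega)]
    rw [List.range_succ_eq_map]
    simp only [List.map_cons, List.map_map, List.sum_cons, Function.comp_def,
      Nat.succ_eq_add_one]
    simp only [Nat.add_zero, add_assoc]
    simp only [show ∀ t : Nat, j + (1 + (1 + t)) = j + (1 + (t + 1)) from fun t => by omega]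

-- ===== VERDICT (by name: the statement is the Claim_ definition above) =====
theorem sum_of_k_biggest_in_subarrays_spec : Claim_equal_sum_of_k_biggest_in_subarrays := by
  intro T p k _hDom hPre
  obtain ⟨hp1, hT, _hk1, _hk2⟩ := hPre
  unfold Spec_sum_of_k_biggest_in_subarrays
  obtain ⟨P, rfl⟩ : ∃ P : Nat, p = (P : Int) := ⟨p.toNat, by omega⟩
  have hP1 : 1 ≤ P := by exact_mod_cast hp1
  have hw0 : PySem.List.sorted (T.take ((P : Int)).toNat) (fun x => x) false = pvWin T P 0 := by
    rw [pvWin, List.drop_zero, Int.toNat_natCast]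
  by_cases hPn : P ≤ T.length
  · -- sliding case: both sides are the first summand plus one summand per later window
    have hA : sum_of_k_biggest_in_subarrays T (P : Int) k
        = pvF T P 0 k + ((List.range (T.length - P)).map (fun t => pvF T P (1 + t) k)).sum := by
      rw [sum_of_k_biggest_in_subarrays]
      simp only [PySem.List.len_eq]
      rw [PySem.List.slice_to T (Int.natCast_nonneg P), hw0]
      have hloop := pvLoop T P k hP1 (T.length - P) 0
        (0 + PySem.List.pyGetD (pvWin T P 0) (-k) 0) (by omega)
      simp only [Nat.cast_zero, add_zero] at hloop
      rw [hloop]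
      simp [pvF]
    have hB : sum_of_k_biggest_in_subarrays_alt T (P : Int) k
        = pvF T P 0 k + ((List.range (T.length - P)).map (fun t => pvF T P (1 + t) k)).sum := by
      rw [sum_of_k_biggest_in_subarrays_alt]
      simp only [PySem.List.len_eq]
      rw [PySem.List.slice_to T (Int.natCast_nonneg P), hw0]
      rw [PySem.List.foldl_add, PySem.List.pyRange_one]
      rw [show ((T.length : Int) - (P : Int) + 1 - 1).toNat = T.length - P by omega]
      rw [List.map_map]
      congr 1
      apply congrArg
      apply List.map_congr_left
      intro t _
      simp only [Function.comp_def]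
      rw [show (1 : Int) + (t : Nat) = ((1 + t : Nat) : Int) by omega,
        PySem.List.slice_natCast_add]
      rfl
    rw [hA, hB]
  · -- clamped case p > len T: one window on both sides, both loops are empty
    rw [sum_of_k_biggest_in_subarrays, sum_of_k_biggest_in_subarrays_alt]
    simp only [PySem.List.len_eq]
    rw [PySem.List.pyRange_one_eq_nil (by omega), PySem.List.pyRange_one_eq_nil (by omega)]
    simp
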